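-- pv_equiv track=rewrite | github.com/rathodvamshi/Privacy_Fortress | backend/app/middleware/decision_engine.py | _tokenize_with_spans
-- ===== SOURCE A (Python) =====
-- from typing import List, Dict, Literal, Tuple
--
-- def _tokenize_with_spans(text: str) -> List[Tuple[str, int, int]]:
--     """
--     Very lightweight tokenizer that returns (token, start, end) spans.
--     Used only for context-window extraction; does NOT leave process
--     or call any external NLP APIs.
--     """
--     tokens: List[Tuple[str, int, int]] = []
--     if not text:
--         return tokens
--
--     idx = 0
--     for raw in text.split():
--         start = text.find(raw, idx)
--         if start == -1:
--             continue
--         end = start + len(raw)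
--         tokens.append((raw, start, end))
--         idx = end
--     return tokens
-- ===== SOURCE B (Python) =====
-- from typing import List, Tuple
--
-- def _tokenize_with_spans(text: str) -> List[Tuple[str, int, int]]:
--     """Single left-to-right character scan: accumulate non-space runs and
--     emit (token, start, end) at each whitespace boundary / end of string."""
--     tokens: List[Tuple[str, int, int]] = []
--     buf: List[str] = []
--     start = 0
--     i = 0
--     for i, ch in enumerate(text):
--         if ch.isspace():
--             if buf:
--                 tokens.append(("".join(buf), start, i))
--                 buf = []
--         else:
--             if not buf:
--                 start = i
--             buf.append(ch)
--     if buf: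
--         tokens.append(("".join(buf), start, len(text)))
--     return tokens
-- ===== Notes on version B (the rewrite author's own statement) =====
-- stated objective: alternative
-- what changed: Replaced split()-then-find() re-scanning (each token is searched for again in the original string) by one direct character scan that tracks the current token's start index, emitting spans at whitespace boundaries.
import Mathlib
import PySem

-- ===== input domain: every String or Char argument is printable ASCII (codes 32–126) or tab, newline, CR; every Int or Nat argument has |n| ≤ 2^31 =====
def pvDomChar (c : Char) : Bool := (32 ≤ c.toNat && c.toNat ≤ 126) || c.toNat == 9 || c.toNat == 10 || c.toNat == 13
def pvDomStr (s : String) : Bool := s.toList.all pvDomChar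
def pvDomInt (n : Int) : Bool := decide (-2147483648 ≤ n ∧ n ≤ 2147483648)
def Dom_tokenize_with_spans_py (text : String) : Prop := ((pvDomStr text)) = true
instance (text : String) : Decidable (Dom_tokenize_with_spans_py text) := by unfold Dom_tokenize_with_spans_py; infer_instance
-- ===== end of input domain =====

-- B replaces A's split()-then-find() token re-searching by a single character scan tracking the token start.


-- ===== PORT A =====
def tokenize_with_spans_py (text : String) : List (String × Int × Int) :=
  if text.toList.isEmpty then []           -- `if not text: return tokens`
  else
    -- `for raw in text.split(): …` with loop state (tokens, idx)
    ((PySem.Str.split₀ text).foldl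
      (fun (st : List (String × Int × Int) × Int) raw =>
        let start := PySem.Str.findFrom text raw st.2
        if start = -1 then st              -- `continue`
        else
          let end_ := start + PySem.Str.len raw
          (st.1 ++ [(raw, start, end_)], end_))
      ([], 0)).1

-- ===== PORT B =====
-- the scan loop of Source B: state = (remaining chars, i, tokens, start, buf)
def tokenizeAltGo : List Char → Nat → List (String × Int × Int) → Nat → List Char →
    List (String × Int × Int)
  | [], i, tokens, start, buf =>
      if buf.isEmpty then tokens
      else tokens ++ [(String.ofList buf, (start : Int), (i : Int))]
  | c :: rest, i, tokens, start, buf =>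
      if PySem.Chars.strIsspace [c] then   -- `ch.isspace()`
        if buf.isEmpty then tokenizeAltGo rest (i + 1) tokens start buf
        else tokenizeAltGo rest (i + 1)
               (tokens ++ [(String.ofList buf, (start : Int), (i : Int))]) start []
      else
        if buf.isEmpty then tokenizeAltGo rest (i + 1) tokens i (buf ++ [c])
        else tokenizeAltGo rest (i + 1) tokens start (buf ++ [c])

def tokenize_with_spans_py_alt (text : String) : List (String × Int × Int) :=
  tokenizeAltGo text.toList 0 [] 0 []

-- ===== PRECONDITION & SPEC =====
def Spec_tokenize_with_spans_py (text : String) (out : List (String × Int × Int)) : Prop := out = tokenize_with_spans_py_alt text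
instance (text : String) (out : List (String × Int × Int)) : Decidable (Spec_tokenize_with_spans_py text out) := by unfold Spec_tokenize_with_spans_py; infer_instance

-- ===== CLAIM (what is proved, stated in full; the proofs are below) =====
def Claim_equal_tokenize_with_spans_py : Prop := ∀ (text : String), Dom_tokenize_with_spans_py text → Spec_tokenize_with_spans_py text (tokenize_with_spans_py text)

-- ===== LEMMAS AND PROOFS =====

-- equation lemmas for PySem.Chars.split₀.go, restated for rewriting
lemma pv_go_nil (cur : List Char) (acc : List (List Char)) :
    PySem.Chars.split₀.go [] cur acc =
      if cur.isEmpty then acc.reverse else (cur.reverse :: acc).reverse := rfl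

lemma pv_go_cons (c : Char) (rest cur : List Char) (acc : List (List Char)) :
    PySem.Chars.split₀.go (c :: rest) cur acc =
      if PySem.Chars.isspace c then
        (if cur.isEmpty then PySem.Chars.split₀.go rest [] acc
         else PySem.Chars.split₀.go rest [] (cur.reverse :: acc))
      else PySem.Chars.split₀.go rest (c :: cur) acc := rfl

-- equation lemmas for tokenizeAltGo
lemma pv_alt_nil (i : Nat) (tokens : List (String × Int × Int)) (start : Nat) (buf : List Char) :
    tokenizeAltGo [] i tokens start buf =
      if buf.isEmpty then tokens
      else tokens ++ [(String.ofList buf, (start : Int), (i : Int))] := rfl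

lemma pv_alt_cons (c : Char) (rest : List Char) (i : Nat)
    (tokens : List (String × Int × Int)) (start : Nat) (buf : List Char) :
    tokenizeAltGo (c :: rest) i tokens start buf =
      if PySem.Chars.strIsspace [c] then
        if buf.isEmpty then tokenizeAltGo rest (i + 1) tokens start buf
        else tokenizeAltGo rest (i + 1)
               (tokens ++ [(String.ofList buf, (start : Int), (i : Int))]) start []
      else
        if buf.isEmpty then tokenizeAltGo rest (i + 1) tokens i (buf ++ [c])
        else tokenizeAltGo rest (i + 1) tokens start (buf ++ [c]) := rfl

lemma pv_isspace_single (c : Char) :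
    PySem.Chars.strIsspace [c] = PySem.Chars.isspace c := by
  simp [PySem.Chars.strIsspace]

-- the element sitting at position k of a list, read off a drop-decomposition
lemma pv_drop_head (l : List Char) (k : Nat) (c : Char) (rest : List Char)
    (h : l.drop k = c :: rest) (hk : k < l.length) : l[k] = c := by
  have h1 : l[k]? = some c := by
    have h0 := congrArg (fun x => x[0]?) h
    simpa [List.getElem?_drop] using h0
  rw [List.getElem?_eq_getElem hk] at h1
  exact Option.some.inj h1

-- the accumulator of split₀.go factors out
lemma pv_go_acc (s : List Char) : ∀ (cur : List Char) (acc : List (List Char)),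
    PySem.Chars.split₀.go s cur acc = acc.reverse ++ PySem.Chars.split₀.go s cur [] := by
  induction s with
  | nil =>
      intro cur acc
      rw [pv_go_nil, pv_go_nil]
      by_cases h : cur.isEmpty
      · rw [if_pos h, if_pos h]; simp
      · rw [if_neg h, if_neg h]; simp
  | cons c rest ih =>
      intro cur acc
      rw [pv_go_cons, pv_go_cons]
      by_cases hs : PySem.Chars.isspace c
      · rw [if_pos hs, if_pos hs]
        by_cases h : cur.isEmpty
        · rw [if_pos h, if_pos h, ih [] acc]
        · rw [if_neg h, if_neg h, ih [] (cur.reverse :: acc), ih [] [cur.reverse]]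
          simp
      · rw [if_neg hs, if_neg hs, ih (c :: cur) acc]

-- split₀.go consumes a run of non-space characters into cur
lemma pv_go_word (w : List Char) : ∀ (tail cur : List Char) (acc : List (List Char)),
    (∀ c ∈ w, PySem.Chars.isspace c = false) →
    PySem.Chars.split₀.go (w ++ tail) cur acc =
      PySem.Chars.split₀.go tail (w.reverse ++ cur) acc := by
  induction w with
  | nil => intro tail cur acc _; simp
  | cons c w' ih =>
      intro tail cur acc h
      have hc : PySem.Chars.isspace c = false := h c (by simp)
      rw [List.cons_append, pv_go_cons, if_neg (by simp [hc])]
      rw [ih tail (c :: cur) acc (fun d hd => h d (by simp [hd]))]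
      simp

lemma pv_split0_cons_space (c : Char) (rest : List Char)
    (hc : PySem.Chars.isspace c = true) :
    PySem.Chars.split₀ (c :: rest) = PySem.Chars.split₀ rest := by
  unfold PySem.Chars.split₀
  rw [pv_go_cons, if_pos hc]
  simp

-- split₀ of "word ++ tail" where word is a maximal non-space run
lemma pv_split0_decomp (w t : List Char) (hwne : w ≠ [])
    (hwns : ∀ c ∈ w, PySem.Chars.isspace c = false)
    (ht : t = [] ∨ ∃ d t', t = d :: t' ∧ PySem.Chars.isspace d = true) :
    PySem.Chars.split₀ (w ++ t) = w :: PySem.Chars.split₀ t := by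
  unfold PySem.Chars.split₀
  rw [pv_go_word w t [] [] hwns]
  rcases ht with ht | ⟨d, t', ht, hd⟩
  · subst ht
    rw [pv_go_nil, pv_go_nil, if_neg (by simp [hwne])]
    simp
  · subst ht
    rw [pv_go_cons, if_pos hd, if_neg (by simp [hwne]), pv_go_acc, pv_go_cons, if_pos hd]
    simp

-- head of dropWhile fails the predicate
lemma pv_dropWhile_head (p : Char → Bool) (l : List Char) (d : Char) (t' : List Char)
    (h : l.dropWhile p = d :: t') : p d = false := by
  induction l with
  | nil => simp at h
  | cons a l ih =>
      rw [List.dropWhile_cons] at h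
      by_cases hpa : p a = true
      · rw [if_pos hpa] at h; exact ih h
      · rw [if_neg hpa] at h
        cases h
        simpa using hpa

-- find of a word at the position where it starts, searching past a whitespace run
lemma pv_findFrom_eq (text : String) (j k : Nat) (word tail : List Char)
    (hjk : j ≤ k) (hk : k ≤ text.toList.length)
    (hdrop : text.toList.drop k = word ++ tail)
    (hwne : word ≠ [])
    (hwns : ∀ c ∈ word, PySem.Chars.isspace c = false)
    (hsp : ∀ i, j ≤ i → i < k → ∀ (h : i < text.toList.length),
        PySem.Chars.isspace (text.toList[i]) = true) :
    PySem.Str.findFrom text (String.ofList word) ((j : Nat) : Int) = (k : Int) := by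
  have htl : (String.ofList word).toList = word := by simp
  rw [PySem.Str.findFrom_eq, htl]
  have hj : j ≤ text.toList.length := le_trans hjk hk
  rw [PySem.Chars.findFrom_natCast text.toList word j hj]
  have hexist : word <+: (text.toList.drop j).drop (k - j) := by
    rw [List.drop_drop]
    have hx : j + (k - j) = k := by omega
    rw [hx, hdrop]
    exact List.prefix_append _ _
  have hpos : 0 ≤ PySem.Chars.find (text.toList.drop j) word := by
    rw [PySem.Chars.find_nonneg_iff]
    rw [← PySem.Chars.isIn_iff_infix, ← PySem.Chars.exists_prefix_drop_iff_isIn]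
    exact ⟨k - j, hexist⟩
  obtain ⟨hpre, hmin⟩ := PySem.Chars.find_spec (s := text.toList.drop j) (sub := word) hpos
  set f := (PySem.Chars.find (text.toList.drop j) word).toNat with hf
  have hfe : f = k - j := by
    rcases Nat.lt_trichotomy f (k - j) with hlt | heq | hgt
    · exfalso
      obtain ⟨c, word', hword⟩ : ∃ c word', word = c :: word' := by
        cases word with
        | nil => exact absurd rfl hwne
        | cons a b => exact ⟨a, b, rfl⟩
      have hjf : j + f < text.toList.length := by omega
      have hdr : (text.toList.drop j).drop f = text.toList.drop (j + f) :=
        List.drop_drop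
      rw [hdr] at hpre
      obtain ⟨u, hu⟩ := hpre
      rw [hword, List.cons_append] at hu
      have hck : text.toList[j + f] = c := pv_drop_head _ _ _ _ hu.symm hjf
      have hsp' := hsp (j + f) (by omega) (by omega) hjf
      rw [hck] at hsp'
      have hns := hwns c (by simp [hword])
      rw [hns] at hsp'
      exact Bool.false_ne_true hsp'
    · exact heq
    · exact absurd hexist (hmin (k - j) hgt)
  have hfind : PySem.Chars.find (text.toList.drop j) word = ((k - j : Nat) : Int) := by
    rw [← hfe, hf, Int.toNat_of_nonneg hpos]
  rw [hfind, if_neg (by omega)]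
  omega

-- B consumes a run of non-space characters by extending buf
lemma pv_altGo_word (w : List Char) : ∀ (rest : List Char) (i : Nat)
    (tokens : List (String × Int × Int)) (start : Nat) (buf : List Char),
    (∀ c ∈ w, PySem.Chars.isspace c = false) → buf ≠ [] →
    tokenizeAltGo (w ++ rest) i tokens start buf =
      tokenizeAltGo rest (i + w.length) tokens start (buf ++ w) := by
  induction w with
  | nil => intro rest i tokens start buf _ _; simp
  | cons c w' ih =>
      intro rest i tokens start buf h hbuf
      have hc : PySem.Chars.isspace c = false := h c (by simp)
      rw [List.cons_append, pv_alt_cons, pv_isspace_single, hc]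
      simp only [Bool.false_eq_true, if_false]
      rw [if_neg (by simp [hbuf])]
      rw [ih rest (i + 1) tokens start (buf ++ [c]) (fun d hd => h d (by simp [hd])) (by simp)]
      simp only [List.append_assoc, List.singleton_append, List.length_cons]
      congr 1
      omega

-- the master invariant: A's fold over the words of the unread suffix equals B's scan of it.
-- j = A's idx (end of the previous token), k = B's position; in between only whitespace.
lemma pv_main (n : Nat) : ∀ (s : List Char) (text : String) (j k : Nat)
    (tokens : List (String × Int × Int)) (start : Nat),
    s.length ≤ n → j ≤ k → k ≤ text.toList.length → text.toList.drop k = s →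
    (∀ i, j ≤ i → i < k → ∀ (h : i < text.toList.length),
        PySem.Chars.isspace (text.toList[i]) = true) →
    (((PySem.Chars.split₀ s).map String.ofList).foldl
      (fun (st : List (String × Int × Int) × Int) raw =>
        let start := PySem.Str.findFrom text raw st.2
        if start = -1 then st
        else
          let end_ := start + PySem.Str.len raw
          (st.1 ++ [(raw, start, end_)], end_))
      (tokens, ((j : Nat) : Int))).1
    = tokenizeAltGo s k tokens start [] := by
  induction n with
  | zero =>
      intro s text j k tokens start hn _ _ _ _
      have hs : s = [] := List.length_eq_zero_iff.mp (Nat.le_zero.mp hn)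
      subst hs
      simp [PySem.Chars.split₀, pv_go_nil, pv_alt_nil]
  | succ m ih =>
      intro s text j k tokens start hn hjk hk hdrop hsp
      match s with
      | [] => simp [PySem.Chars.split₀, pv_go_nil, pv_alt_nil]
      | c :: rest =>
        have hlen0 := congrArg List.length hdrop
        rw [List.length_drop, List.length_cons] at hlen0
        have hklt : k < text.toList.length := by omega
        by_cases hc : PySem.Chars.isspace c
        · -- whitespace at position k: both sides skip it
          rw [pv_split0_cons_space c rest hc,
              pv_alt_cons, pv_isspace_single, if_pos hc, if_pos List.isEmpty_nil]
          apply ih rest text j (k + 1) tokens start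
          · simpa using Nat.le_of_succ_le_succ hn
          · omega
          · omega
          · rw [← List.drop_drop, hdrop]; rfl
          · intro i hji hik hi
            rcases Nat.lt_or_ge i k with hx | hx
            · exact hsp i hji hx hi
            · have hik' : i = k := by omega
              subst hik'
              rw [pv_drop_head text.toList i c rest hdrop hi]
              exact hc
        · -- a word starts at position k
          have hc' : PySem.Chars.isspace c = false := by simpa using hc
          set p : Char → Bool := fun x => !PySem.Chars.isspace x with hp
          set w := (c :: rest).takeWhile p with hwdef
          set t := (c :: rest).dropWhile p with htdef
          have hwt : w ++ t = c :: rest := List.takeWhile_append_dropWhile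
          have hwns : ∀ d ∈ w, PySem.Chars.isspace d = false := by
            intro d hd
            have := List.mem_takeWhile_imp hd
            simpa [hp] using this
          have hwne : w ≠ [] := by
            rw [hwdef, List.takeWhile_cons_of_pos (by simp [hp, hc'])]
            simp
          have htshape : t = [] ∨ ∃ d t', t = d :: t' ∧ PySem.Chars.isspace d = true := by
            cases htt : t with
            | nil => exact Or.inl rfl
            | cons d t' =>
                refine Or.inr ⟨d, t', rfl, ?_⟩
                have hhd : p d = false :=
                  pv_dropWhile_head p (c :: rest) d t' (by rw [← htdef]; exact htt)
                simpa [hp] using hhd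
          have hdrop' : text.toList.drop k = w ++ t := by rw [hdrop, ← hwt]
          have hsplit : PySem.Chars.split₀ (c :: rest) = w :: PySem.Chars.split₀ t := by
            rw [← hwt]
            exact pv_split0_decomp w t hwne hwns htshape
          have hfind := pv_findFrom_eq text j k w t hjk (le_of_lt hklt) hdrop' hwne hwns hsp
          rw [hsplit, List.map_cons, List.foldl_cons]
          dsimp only
          rw [hfind, if_neg (show ¬((k : Int) = -1) by omega)]
          have hlenw : (k : Int) + PySem.Str.len (String.ofList w) = ((k + w.length : Nat) : Int) := by
            simp [PySem.Str.len]
          rw [hlenw]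
          -- B's side: consume the word characters
          have hB : tokenizeAltGo (c :: rest) k tokens start [] =
              tokenizeAltGo t (k + w.length) tokens k w := by
            rw [pv_alt_cons, pv_isspace_single, hc']
            simp only [Bool.false_eq_true, if_false, List.isEmpty_nil, if_pos, List.nil_append]
            have hrest : rest = rest.takeWhile p ++ rest.dropWhile p :=
              (List.takeWhile_append_dropWhile).symm
            have hw0 : w = c :: rest.takeWhile p := by
              rw [hwdef, List.takeWhile_cons_of_pos (by simp [hp, hc'])]
            have ht0 : t = rest.dropWhile p := by
              rw [htdef, List.dropWhile_cons_of_pos (by simp [hp, hc'])]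
            rw [show tokenizeAltGo rest (k + 1) tokens k [c] =
                  tokenizeAltGo (rest.takeWhile p ++ rest.dropWhile p) (k + 1) tokens k [c]
                from by rw [← hrest]]
            rw [pv_altGo_word (rest.takeWhile p) (rest.dropWhile p) (k + 1) tokens k [c]
                  (fun d hd => hwns d (by rw [hw0]; exact List.mem_cons_of_mem _ hd))
                  (by simp)]
            rw [← ht0, hw0]
            simp only [List.singleton_append, List.length_cons]
            congr 1
            omega
          rw [hB]
          rcases htshape with ht | ⟨d, t', ht, hd⟩
          · -- word runs to the end of the string
            rw [ht]
            rw [pv_alt_nil, if_neg (by simp [hwne])]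
            simp [PySem.Chars.split₀, pv_go_nil]
          · -- word followed by a whitespace char d
            rw [ht, pv_split0_cons_space d t' hd,
                pv_alt_cons, pv_isspace_single, if_pos hd, if_neg (by simp [hwne])]
            have hdk : text.toList.drop (k + w.length) = d :: t' := by
              rw [← List.drop_drop, hdrop', ht, List.drop_left]
            have hdk' : text.toList.drop (k + w.length + 1) = t' := by
              rw [← List.drop_drop, hdk]
              rfl
            have hlen1 := congrArg List.length hdk
            rw [List.length_drop, List.length_cons] at hlen1
            have hwl : 1 ≤ w.length := by
              cases hwx : w with
              | nil => exact absurd hwx hwne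
              | cons a b => simp
            have hL := congrArg List.length hwt
            rw [List.length_append, ht] at hL
            simp only [List.length_cons] at hL hn
            apply ih t' text (k + w.length) (k + w.length + 1)
              (tokens ++ [(String.ofList w, (k : Int), ((k + w.length : Nat) : Int))]) k
            · omega
            · omega
            · omega
            · exact hdk'
            · intro i hji hik hi
              have hik' : i = k + w.length := by omega
              subst hik'
              rw [pv_drop_head text.toList _ d t' hdk hi]
              exact hd

-- ===== VERDICT (by name: the statement is the Claim_ definition above) =====
theorem tokenize_with_spans_py_spec : Claim_equal_tokenize_with_spans_py := by
  intro text _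
  show tokenize_with_spans_py text = tokenize_with_spans_py_alt text
  unfold tokenize_with_spans_py tokenize_with_spans_py_alt
  by_cases h : text.toList.isEmpty
  · rw [if_pos h, List.isEmpty_iff.mp h]
    rfl
  · rw [if_neg h]
    have hsp : PySem.Str.split₀ text = (PySem.Chars.split₀ text.toList).map String.ofList := rfl
    rw [hsp]
    have := pv_main text.toList.length text.toList text 0 0 [] 0 (le_refl _)
      (le_refl _) (Nat.zero_le _) (by simp) (by omega)
    simpa using this
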